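-- pv_equiv track=rewrite | github.com/Anakondos/job-tracker | browser/v5/engine.py | match_option
-- ===== SOURCE A (Python) =====
-- from typing import Optional, List, Dict, Any, Tuple
--
-- def match_option(answer: str, options: List[str]) -> Optional[str]:
--     if not options:
--         return answer
--     answer_lower = answer.lower().strip()
--     for opt in options:
--         if opt.lower() == answer_lower:
--             return opt
--     for opt in options:
--         if answer_lower in opt.lower() or opt.lower() in answer_lower:
--             return opt
--     return options[0] if options else answer
-- ===== SOURCE B (Python) =====
-- def match_option(answer, options):
--     if not options:
--         return answer
--     answer_lower = answer.lower().strip()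
--     candidate = None
--     for opt in options:
--         optl = opt.lower()
--         if optl == answer_lower:
--             return opt
--         if candidate is None and (answer_lower in optl or optl in answer_lower):
--             candidate = opt
--     return candidate if candidate is not None else options[0]
-- ===== Notes on version B (the rewrite author's own statement) =====
-- stated objective: alternative
-- what changed: Replaces A's two separate scans over options with a single loop maintaining a candidate for the first substring match, returning immediately on an exact match and lowercasing each option only once.
import Mathlib
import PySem

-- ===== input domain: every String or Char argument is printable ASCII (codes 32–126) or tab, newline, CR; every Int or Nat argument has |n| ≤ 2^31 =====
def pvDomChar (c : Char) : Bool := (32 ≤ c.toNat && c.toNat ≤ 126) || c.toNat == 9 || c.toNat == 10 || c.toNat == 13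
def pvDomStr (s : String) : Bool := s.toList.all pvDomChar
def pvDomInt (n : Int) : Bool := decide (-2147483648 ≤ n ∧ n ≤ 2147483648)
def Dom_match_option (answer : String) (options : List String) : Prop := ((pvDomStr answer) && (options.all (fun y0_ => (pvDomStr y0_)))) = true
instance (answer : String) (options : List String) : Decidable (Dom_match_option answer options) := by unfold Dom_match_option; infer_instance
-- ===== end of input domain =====

-- B replaces A's two scans with one pass keeping a candidate; return value only, same results.
-- ===== PORT A =====
def aLoop1 (al : String) : List String → Option String
  | [] => none
  | o :: rest => if PySem.Str.lower o == al then some o else aLoop1 al rest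

def aLoop2 (al : String) : List String → Option String
  | [] => none
  | o :: rest =>
      if PySem.Str.isIn al (PySem.Str.lower o) || PySem.Str.isIn (PySem.Str.lower o) al then some o
      else aLoop2 al rest

def aFallback (answer : String) : List String → Option String
  | [] => some answer
  | o :: _ => some o

def match_option (answer : String) (options : List String) : Option String :=
  if options.isEmpty then some answer
  else
    let al := PySem.Str.strip (PySem.Str.lower answer)
    match aLoop1 al options with
    | some o => some o
    | none =>
      match aLoop2 al options with
      | some o => some o
      | none => aFallback answer options

-- ===== PORT B =====
def bLoop (al fallback : String) (cand : Option String) : List String → String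
  | [] => match cand with | some c => c | none => fallback
  | o :: rest =>
      let ol := PySem.Str.lower o
      if ol == al then o
      else if cand.isNone && (PySem.Str.isIn al ol || PySem.Str.isIn ol al) then
        bLoop al fallback (some o) rest
      else bLoop al fallback cand rest

def match_option_alt (answer : String) (options : List String) : Option String :=
  match options with
  | [] => some answer
  | first :: _ =>
    let al := PySem.Str.strip (PySem.Str.lower answer)
    some (bLoop al first none options)

-- ===== PRECONDITION & SPEC =====
def Spec_match_option (answer : String) (options : List String) (out : Option String) : Prop := out = match_option_alt answer options
instance (answer : String) (options : List String) (out : Option String) : Decidable (Spec_match_option answer options out) := by unfold Spec_match_option; infer_instance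

-- ===== CLAIM (what is proved, stated in full; the proofs are below) =====
def Claim_equal_match_option : Prop := ∀ (answer : String) (options : List String), Dom_match_option answer options → Spec_match_option answer options (match_option answer options)

-- ===== LEMMAS AND PROOFS =====
theorem bLoop_eq (al fallback : String) (opts : List String) : ∀ (cand : Option String),
    bLoop al fallback cand opts =
      match aLoop1 al opts with
      | some o => o
      | none =>
        match cand with
        | some c => c
        | none =>
          match aLoop2 al opts with
          | some o => o
          | none => fallback := by
  induction opts with
  | nil => intro cand; cases cand <;> simp [bLoop, aLoop1, aLoop2]
  | cons o rest ih =>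
    intro cand
    by_cases hx : PySem.Str.lower o == al
    · simp [bLoop, aLoop1, hx]
    · by_cases hs : PySem.Str.isIn al (PySem.Str.lower o) || PySem.Str.isIn (PySem.Str.lower o) al
      all_goals cases cand with
        | none => simp [bLoop, aLoop1, aLoop2, hx, ih] <;> (split <;> simp_all)
        | some c => simp [bLoop, aLoop1, hx, ih]

-- ===== VERDICT (by name: the statement is the Claim_ definition above) =====
theorem match_option_spec : Claim_equal_match_option := by
  intro answer options _
  unfold Spec_match_option
  cases options with
  | nil => rfl
  | cons first rest =>
    simp only [match_option, match_option_alt, List.isEmpty_cons, Bool.false_eq_true, if_false]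
    rw [bLoop_eq]
    cases h1 : aLoop1 (PySem.Str.strip (PySem.Str.lower answer)) (first :: rest) <;>
      cases h2 : aLoop2 (PySem.Str.strip (PySem.Str.lower answer)) (first :: rest) <;> rfl
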